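-- pv_equiv track=rewrite | github.com/bdclercq/Spec-Ver | ParityGame/PG.py | to_map
-- ===== SOURCE A (Python) =====
-- def to_map(edges):
--     ''' Transform edges (u, v) from pairs to a map with key v '''
--     map = {}
--     for e in edges:
--         if e[1] not in map.keys():
--             map[e[1]] = [e[0]]
--         else:
--             map[e[1]].append(e[0])
--     return map
-- ===== SOURCE B (Python) =====
-- def to_map(edges):
--     ''' Transform edges (u, v) from pairs to a map with key v '''
--     targets = dict.fromkeys(v for _, v in edges)
--     return {v: [u for u, w in edges if w == v] for v in targets}
-- ===== Notes on version B (the rewrite author's own statement) =====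
-- stated objective: alternative
-- what changed: A builds the dict in one insert-or-append pass over the edges; B first dedups the targets (dict.fromkeys) and then builds each value list by one filtering scan of the edges per target.
import Mathlib
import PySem

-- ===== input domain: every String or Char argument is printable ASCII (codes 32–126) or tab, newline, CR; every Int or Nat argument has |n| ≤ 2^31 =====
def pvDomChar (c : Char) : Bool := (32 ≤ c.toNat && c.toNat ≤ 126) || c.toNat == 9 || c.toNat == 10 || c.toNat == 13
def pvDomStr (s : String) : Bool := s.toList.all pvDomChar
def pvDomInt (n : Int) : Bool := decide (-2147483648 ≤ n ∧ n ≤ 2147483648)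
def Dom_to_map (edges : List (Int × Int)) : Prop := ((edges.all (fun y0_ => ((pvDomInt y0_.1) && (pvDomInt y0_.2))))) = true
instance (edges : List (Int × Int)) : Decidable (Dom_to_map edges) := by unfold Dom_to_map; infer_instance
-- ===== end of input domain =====

-- B replaces A's insert-or-append dict pass by a dedup of the targets followed by one filtering scan per target (objective: alternative decomposition, same result).

-- ===== PORT A =====
-- map = {}; for e in edges: if e[1] not in map: map[e[1]] = [e[0]] else: map[e[1]].append(e[0])
def to_map (edges : List (Int × Int)) : List (Int × List Int) :=
  (edges.foldl
    (fun d e =>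
      if d.contains e.2 = false then d.insert e.2 [e.1]
      else d.modify e.2 [] (fun l => l ++ [e.1]))
    PySem.Dict.empty).items

-- ===== PORT B =====
-- targets = dict.fromkeys(v for _, v in edges); {v: [u for u, w in edges if w == v] for v in targets}
def to_map_alt (edges : List (Int × Int)) : List (Int × List Int) :=
  (PySem.List.dedup (edges.map (·.2))).map
    (fun v => (v, (edges.filter (fun e => e.2 == v)).map (·.1)))

-- ===== PRECONDITION & SPEC =====
def Spec_to_map (edges : List (Int × Int)) (out : List (Int × List Int)) : Prop := out = to_map_alt edges
instance (edges : List (Int × Int)) (out : List (Int × List Int)) : Decidable (Spec_to_map edges out) := by unfold Spec_to_map; infer_instance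

-- ===== CLAIM (what is proved, stated in full; the proofs are below) =====
def Claim_equal_to_map : Prop := ∀ (edges : List (Int × Int)), Dom_to_map edges → Spec_to_map edges (to_map edges)

-- ===== LEMMAS AND PROOFS =====

-- A's branch on membership is exactly Python's d.modify (insert-at-end when absent, in-place append when present)
lemma step_eq_modify (d : PySem.Dict Int (List Int)) (e : Int × Int) :
    (if d.contains e.2 = false then d.insert e.2 [e.1]
     else d.modify e.2 [] (fun l => l ++ [e.1]))
    = d.modify e.2 [] (fun l => l ++ [e.1]) := by
  by_cases h : d.contains e.2 = false
  · simp only [h, if_pos]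
    unfold PySem.Dict.modify PySem.Dict.insert
    simp [h, PySem.Dict.getD_of_not_contains (h := h)]
  · simp [h]

lemma to_map_eq (edges : List (Int × Int)) : to_map edges = to_map_alt edges := by
  unfold to_map to_map_alt
  rw [show (fun d (e : Int × Int) =>
        if d.contains e.2 = false then d.insert e.2 [e.1]
        else d.modify e.2 [] (fun l => l ++ [e.1]))
      = (fun d (e : Int × Int) => d.modify e.2 [] (fun l => l ++ [e.1]))
    from funext fun d => funext fun e => step_eq_modify d e]
  have hnd : (edges.foldl (fun d (e : Int × Int) => d.modify e.2 [] (fun l => l ++ [e.1]))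
      (PySem.Dict.empty : PySem.Dict Int (List Int))).keys.Nodup := by
    apply PySem.Dict.nodup_keys_foldl_modify_key
    simp
  rw [PySem.Dict.items_eq_map_keys _ hnd []]
  rw [PySem.Dict.keys_foldl_modify_key]
  have hkeys : PySem.Set.update (PySem.Dict.empty : PySem.Dict Int (List Int)).keys (edges.map (·.2))
      = PySem.List.dedup (edges.map (·.2)) := by
    simp [PySem.Set.update, PySem.Set.ofList_eq_foldl]
  rw [hkeys]
  apply List.map_congr_left
  intro k _
  have hswap : edges.foldl (fun d (e : Int × Int) => d.modify e.2 [] (fun l => l ++ [e.1]))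
      (PySem.Dict.empty : PySem.Dict Int (List Int))
      = (edges.map Prod.swap).foldl (fun d (p : Int × Int) => d.modify p.1 [] (fun l => l ++ [p.2]))
        PySem.Dict.empty := by
    rw [List.foldl_map]; simp
  rw [hswap, PySem.Dict.getD_foldl_modify_append]
  simp [List.filter_map, Function.comp_def]

-- ===== VERDICT (by name: the statement is the Claim_ definition above) =====
theorem to_map_spec : Claim_equal_to_map := by
  intro edges _
  exact to_map_eq edges
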